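-- pv_equiv track=rewrite | github.com/Asteries/Modern-Progaming | wild.py | get_e
-- ===== SOURCE A (Python) =====
-- def get_e(v, c):
--     l = len(v)
--     e = [[[0, 0, 0] for i in range(l)] for j in range(l)]
--     # 初始化e
--     for i in range(l):
--         for j in range(i + 1, l):
--             # 遍历不同状态的两两组合，注意这里有对称的情况
--             xd = v[i][0] - v[j][0]
--             yr = v[i][1] - v[j][1]
--             # xd：如果两状态可以转化，需要运输的修道士个数 yr：同理，野人个数
--             if abs(xd + yr) <= c and (abs(xd) >= abs(yr) or xd == 0) and (xd != 0 or yr != 0):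
--                 # 约束：船要载得下 修道士不能比野人少（除非是0个修道士） 没有人划船船不能开
--                 if (xd <= 0 and yr <= 0 and v[i][2] == 0 and v[j][2] == 1) or (
--                         xd >= 0 and yr >= 0 and v[i][2] == 1 and v[j][2] == 0):
--                     # 约束：在一次运输中，某一岸的修道士和野人同增同减
--                     e[i][j][0] = 1
--                     e[i][j][1] = abs(xd)
--                     e[i][j][2] = abs(yr)
--                     # 对称的运输也要记录，即能运过去肯定可以运回来
--                     e[j][i][0] = 1
--                     e[j][i][1] = abs(xd)
--                     e[j][i][2] = abs(yr)
--     return e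
-- ===== SOURCE B (Python) =====
-- def get_e(v, c):
--     l = len(v)
--     # hash every state (first three entries) to the list of its row indices
--     index = {}
--     for i, s in enumerate(v):
--         index.setdefault((s[0], s[1], s[2]), []).append(i)
--     e = []
--     for s in v:
--         m, r, b = s[0], s[1], s[2]
--         row = [[0, 0, 0] for _ in range(l)]
--         # for each distinct state on the opposite bank, compute the boat load
--         # needed to reach it and fill the whole group of duplicate columns
--         for (km, kr, kb), idxs in index.items():
--             if b == 0 and kb == 1:
--                 md, cd = km - m, kr - r
--             elif b == 1 and kb == 0:
--                 md, cd = m - km, r - kr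
--             else:
--                 continue
--             if md >= 0 and cd >= 0 and 1 <= md + cd <= c and (md >= cd or md == 0):
--                 for j in idxs:
--                     row[j] = [1, md, cd]
--         e.append(row)
--     return e
-- ===== Notes on version B (the rewrite author's own statement) =====
-- stated objective: alternative
-- what changed: B replaces A's triangular pairwise scan with mirrored in-place matrix writes by a hash index grouping rows under their state triple: each row is filled by computing, for every distinct state on the opposite bank, the directed boat load needed to reach it and writing the whole group of duplicate columns from the index at once.
-- outside the precondition, e.g. on get_e([[]], 1): A returns [[[0, 0, 0]]], B raises IndexError
import Mathlib
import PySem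

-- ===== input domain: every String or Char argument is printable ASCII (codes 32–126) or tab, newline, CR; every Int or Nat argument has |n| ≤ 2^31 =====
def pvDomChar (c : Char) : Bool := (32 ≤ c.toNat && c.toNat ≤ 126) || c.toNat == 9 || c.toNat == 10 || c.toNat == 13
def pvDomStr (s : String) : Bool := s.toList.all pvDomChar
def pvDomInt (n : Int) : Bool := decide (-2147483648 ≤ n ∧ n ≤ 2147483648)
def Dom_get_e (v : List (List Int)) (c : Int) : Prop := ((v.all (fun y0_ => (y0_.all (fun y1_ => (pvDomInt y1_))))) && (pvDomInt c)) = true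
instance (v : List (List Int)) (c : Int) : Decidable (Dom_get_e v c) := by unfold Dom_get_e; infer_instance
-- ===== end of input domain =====

-- B groups the rows in a hash index keyed by their state triple, then fills each row by
-- computing, for every DISTINCT state on the opposite bank, the directed boat load needed to
-- reach it, writing the whole group of duplicate columns at once (objective: alternative;
-- duplicates are tested once instead of per pair, no abs-predicate, no mirror writes).

-- ===== PORT A =====
-- e[i][j] = x (A's three assignments e[i][j][0..2] together write the whole 3-cell)
def pvSet2 (e : List (List (List Int))) (i j : Nat) (x : List Int) : List (List (List Int)) :=
  e.set i ((e.getD i []).set j x)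

-- the body of A's inner loop, for the pair (i, j)
def pvStepA (v : List (List Int)) (c : Int) (e : List (List (List Int))) (i j : Nat) :
    List (List (List Int)) :=
  let xd := (v.getD i []).getD 0 0 - (v.getD j []).getD 0 0
  let yr := (v.getD i []).getD 1 0 - (v.getD j []).getD 1 0
  if |xd + yr| ≤ c ∧ (|yr| ≤ |xd| ∨ xd = 0) ∧ (xd ≠ 0 ∨ yr ≠ 0) then
    if (xd ≤ 0 ∧ yr ≤ 0 ∧ (v.getD i []).getD 2 0 = 0 ∧ (v.getD j []).getD 2 0 = 1) ∨
       (0 ≤ xd ∧ 0 ≤ yr ∧ (v.getD i []).getD 2 0 = 1 ∧ (v.getD j []).getD 2 0 = 0) then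
      pvSet2 (pvSet2 e i j [1, |xd|, |yr|]) j i [1, |xd|, |yr|]
    else e
  else e

def get_e (v : List (List Int)) (c : Int) : List (List (List Int)) :=
  let l := v.length
  let e0 := (List.range l).map (fun _ => (List.range l).map (fun _ => ([0, 0, 0] : List Int)))
  (List.range l).foldl
    (fun e i => ((List.range l).drop (i + 1)).foldl (fun e j => pvStepA v c e i j) e) e0

-- ===== PORT B =====
-- (s[0], s[1], s[2]); rows have ≥ 3 entries under Pre_, so getD is exact there
def pvKey (s : List Int) : Int × Int × Int := (s.getD 0 0, s.getD 1 0, s.getD 2 0)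

-- index.setdefault((s[0],s[1],s[2]), []).append(i) over enumerate(v)
def pvIndex (v : List (List Int)) : PySem.Dict (Int × Int × Int) (List Int) :=
  (PySem.List.enumerate v 0).foldl
    (fun d p => d.modify (pvKey p.2) [] (· ++ [p.1])) PySem.Dict.empty

-- the directed load (md, cd) carried from s's bank to the bank of state k, if the boat moves
def pvLoad (s : List Int) (k : Int × Int × Int) : Option (Int × Int) :=
  if s.getD 2 0 = 0 ∧ k.2.2 = 1 then some (k.1 - s.getD 0 0, k.2.1 - s.getD 1 0)
  else if s.getD 2 0 = 1 ∧ k.2.2 = 0 then some (s.getD 0 0 - k.1, s.getD 1 0 - k.2.1)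
  else none

-- the body of B's loop over index.items(), for the row of state s
def pvStepB (s : List Int) (c : Int) (row : List (List Int))
    (kv : (Int × Int × Int) × List Int) : List (List Int) :=
  match pvLoad s kv.1 with
  | none => row
  | some (md, cd) =>
    if 0 ≤ md ∧ 0 ≤ cd ∧ 1 ≤ md + cd ∧ md + cd ≤ c ∧ (cd ≤ md ∨ md = 0) then
      kv.2.foldl (fun r j => r.set j.toNat [1, md, cd]) row
    else row

def pvRowB (idx : PySem.Dict (Int × Int × Int) (List Int)) (s : List Int) (c : Int) (l : Nat) :
    List (List Int) :=
  idx.items.foldl (pvStepB s c) (List.replicate l [0, 0, 0])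

def get_e_alt (v : List (List Int)) (c : Int) : List (List (List Int)) :=
  let idx := pvIndex v
  v.map (fun s => pvRowB idx s c v.length)

-- ===== PRECONDITION & SPEC =====
-- Pre_ excludes inputs where some row of v has fewer than 3 entries: on most of those the
-- Python A raises IndexError, and on the rest (where A's arithmetic condition happens to fail
-- before the missing boat-side entry is read) B's indexing naturally raises instead.
def Pre_get_e (v : List (List Int)) (c : Int) : Prop := ∀ row ∈ v, 3 ≤ row.length
instance (v : List (List Int)) (c : Int) : Decidable (Pre_get_e v c) := by
  unfold Pre_get_e; infer_instance

def pvWitness_get_e : List (List Int) × Int := ([[3, 3, 1], [2, 2, 0], [3, 2, 0]], 2)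

def Spec_get_e (v : List (List Int)) (c : Int) (out : List (List (List Int))) : Prop :=
  out = get_e_alt v c
instance (v : List (List Int)) (c : Int) (out : List (List (List Int))) :
    Decidable (Spec_get_e v c out) := by unfold Spec_get_e; infer_instance

-- ===== CLAIM (what is proved, stated in full; the proofs are below) =====
def Claim_equal_get_e : Prop :=
  ∀ (v : List (List Int)) (c : Int), Dom_get_e v c → Pre_get_e v c → Spec_get_e v c (get_e v c)

-- ===== LEMMAS AND PROOFS =====

-- the combined condition of A's two nested ifs, for the ordered pair (a, b) of states
def pvCondA (a b : List Int) (c : Int) : Bool :=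
  decide ((|a.getD 0 0 - b.getD 0 0 + (a.getD 1 0 - b.getD 1 0)| ≤ c ∧
      (|a.getD 1 0 - b.getD 1 0| ≤ |a.getD 0 0 - b.getD 0 0| ∨ a.getD 0 0 - b.getD 0 0 = 0) ∧
      (a.getD 0 0 - b.getD 0 0 ≠ 0 ∨ a.getD 1 0 - b.getD 1 0 ≠ 0)) ∧
    ((a.getD 0 0 - b.getD 0 0 ≤ 0 ∧ a.getD 1 0 - b.getD 1 0 ≤ 0 ∧
        a.getD 2 0 = 0 ∧ b.getD 2 0 = 1) ∨
     (0 ≤ a.getD 0 0 - b.getD 0 0 ∧ 0 ≤ a.getD 1 0 - b.getD 1 0 ∧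
        a.getD 2 0 = 1 ∧ b.getD 2 0 = 0)))

-- the value A writes (at both mirrored positions) when pvCondA holds
def pvValA (a b : List Int) : List Int :=
  [1, |a.getD 0 0 - b.getD 0 0|, |a.getD 1 0 - b.getD 1 0|]

-- the cell A's algorithm produces for an ordered pair, as a pure function
def pvCellA (a b : List Int) (c : Int) : List Int :=
  if pvCondA a b c then pvValA a b else [0, 0, 0]

lemma pvCondA_symm (a b : List Int) (c : Int) : pvCondA a b c = pvCondA b a c := by
  simp only [pvCondA, decide_eq_decide]
  constructor <;> rintro ⟨⟨h1, h2, h3⟩, h4 | h4⟩ <;>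
    refine ⟨⟨?_, ?_, ?_⟩, ?_⟩ <;>
    simp only [abs_eq_max_neg] at * <;> omega

lemma pvValA_symm (a b : List Int) : pvValA a b = pvValA b a := by
  unfold pvValA
  rw [abs_sub_comm, abs_sub_comm (a.getD 1 0)]

lemma pvCondA_diag (a : List Int) (c : Int) : pvCondA a a c = false := by
  simp [pvCondA]

-- the cell B's loop body produces for state s and opposite key k, as a pure step on the old cell
def pvCellStepB (s : List Int) (k : Int × Int × Int) (c : Int) (old : List Int) : List Int :=
  match pvLoad s k with
  | none => old
  | some (md, cd) =>
    if 0 ≤ md ∧ 0 ≤ cd ∧ 1 ≤ md + cd ∧ md + cd ≤ c ∧ (cd ≤ md ∨ md = 0) then [1, md, cd]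
    else old

-- B's pure cell on the zero cell equals A's pure cell
lemma pvCellStepB_eq_cellA (a b : List Int) (c : Int) :
    pvCellStepB a (pvKey b) c [0, 0, 0] = pvCellA a b c := by
  unfold pvCellStepB pvCellA
  by_cases h01 : a.getD 2 0 = 0 ∧ b.getD 2 0 = 1
  · rw [show pvLoad a (pvKey b) = some (b.getD 0 0 - a.getD 0 0, b.getD 1 0 - a.getD 1 0) from by
      unfold pvLoad pvKey
      rw [if_pos ⟨h01.1, h01.2⟩]]
    obtain ⟨ha2, hb2⟩ := h01
    unfold pvCondA pvValA
    simp only [decide_eq_true_eq]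
    rcases abs_cases (a.getD 0 0 - b.getD 0 0 + (a.getD 1 0 - b.getD 1 0)) with ⟨h1, h1'⟩ | ⟨h1, h1'⟩ <;>
      rcases abs_cases (a.getD 0 0 - b.getD 0 0) with ⟨h2, h2'⟩ | ⟨h2, h2'⟩ <;>
        rcases abs_cases (a.getD 1 0 - b.getD 1 0) with ⟨h3, h3'⟩ | ⟨h3, h3'⟩ <;>
          rw [h1, h2, h3] <;> split_ifs <;>
            first
              | rfl
              | (exfalso; omega)
              | (simp only [List.cons.injEq, and_true, true_and]; omega)
  · by_cases h10 : a.getD 2 0 = 1 ∧ b.getD 2 0 = 0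
    · rw [show pvLoad a (pvKey b) = some (a.getD 0 0 - b.getD 0 0, a.getD 1 0 - b.getD 1 0) from by
        unfold pvLoad pvKey
        rw [if_neg h01, if_pos ⟨h10.1, h10.2⟩]]
      obtain ⟨ha2, hb2⟩ := h10
      unfold pvCondA pvValA
      simp only [decide_eq_true_eq]
      rcases abs_cases (a.getD 0 0 - b.getD 0 0 + (a.getD 1 0 - b.getD 1 0)) with ⟨h1, h1'⟩ | ⟨h1, h1'⟩ <;>
        rcases abs_cases (a.getD 0 0 - b.getD 0 0) with ⟨h2, h2'⟩ | ⟨h2, h2'⟩ <;>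
          rcases abs_cases (a.getD 1 0 - b.getD 1 0) with ⟨h3, h3'⟩ | ⟨h3, h3'⟩ <;>
            rw [h1, h2, h3] <;> split_ifs <;>
              first
                | rfl
                | (exfalso; omega)
    · rw [show pvLoad a (pvKey b) = none from by
        unfold pvLoad pvKey
        rw [if_neg h01, if_neg h10]]
      have hc : pvCondA a b c = false := by
        simp only [pvCondA, decide_eq_false_iff_not]
        rintro ⟨-, h | h⟩
        · exact h01 ⟨h.2.2.1, h.2.2.2⟩
        · exact h10 ⟨h.2.2.1, h.2.2.2⟩
      rw [hc]
      simp

-- matrix shape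
def pvShape (e : List (List (List Int))) (l : Nat) : Prop :=
  e.length = l ∧ ∀ r ∈ e, r.length = l

def pvRead (e : List (List (List Int))) (p q : Nat) : List Int :=
  (e.getD p []).getD q [0, 0, 0]

lemma pvGetD_set {α : Type} (L : List α) (i j : Nat) (x d : α) (hi : i < L.length) :
    (L.set i x).getD j d = if j = i then x else L.getD j d := by
  simp only [List.getD_eq_getElem?_getD, List.getElem?_set]
  by_cases h' : i = j
  · subst h'
    rw [if_pos rfl, if_pos hi, if_pos rfl, Option.getD_some]
  · rw [if_neg h', if_neg (fun h'' => h' h''.symm)]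

lemma pvGetElem_eq_read (L : List (List (List Int))) (p q : Nat) (hp : p < L.length)
    (hq : q < L[p].length) : L[p][q] = pvRead L p q := by
  unfold pvRead
  rw [List.getD_eq_getElem?_getD (l := L) (i := p), List.getElem?_eq_getElem hp,
    Option.getD_some, List.getD_eq_getElem?_getD, List.getElem?_eq_getElem hq,
    Option.getD_some]

lemma pvRowLen {e : List (List (List Int))} {l : Nat} (h : pvShape e l) {i : Nat}
    (hi : i < l) : (e.getD i []).length = l := by
  obtain ⟨hl, hr⟩ := h
  have hi' : i < e.length := by omega
  rw [List.getD_eq_getElem?_getD, List.getElem?_eq_getElem hi']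
  exact hr _ (List.getElem_mem hi')

lemma pvShape_set2 {e : List (List (List Int))} {l : Nat} (h : pvShape e l)
    {i : Nat} (hi : i < l) (j : Nat) (x : List Int) : pvShape (pvSet2 e i j x) l := by
  obtain ⟨hl, hr⟩ := h
  refine ⟨by simp [pvSet2, hl], ?_⟩
  intro r hrm
  rcases List.mem_or_eq_of_mem_set hrm with h' | h'
  · exact hr r h'
  · subst h'
    rw [List.length_set]
    exact pvRowLen ⟨hl, hr⟩ hi

lemma pvRead_set2 {e : List (List (List Int))} {l : Nat} (h : pvShape e l)
    {i j : Nat} (hi : i < l) (hj : j < l) (x : List Int) (p q : Nat) :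
    pvRead (pvSet2 e i j x) p q = if p = i ∧ q = j then x else pvRead e p q := by
  have hrow : (e.getD i []).length = l := pvRowLen h hi
  have hi' : i < e.length := by rw [h.1]; exact hi
  unfold pvRead pvSet2
  rw [pvGetD_set e i p _ [] hi']
  by_cases hp : p = i
  · subst hp
    rw [if_pos rfl, pvGetD_set _ j q x _ (by omega)]
    by_cases hq : q = j
    · subst hq
      rw [if_pos rfl, if_pos ⟨rfl, rfl⟩]
    · rw [if_neg hq, if_neg (fun h' => hq h'.2)]
  · rw [if_neg hp, if_neg (fun h' => hp h'.1)]

lemma pvShape_step {v : List (List Int)} {c : Int} {e : List (List (List Int))} {l : Nat}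
    (h : pvShape e l) {i j : Nat} (hi : i < l) (hj : j < l) :
    pvShape (pvStepA v c e i j) l := by
  simp only [pvStepA]
  split_ifs <;> first | exact pvShape_set2 (pvShape_set2 h hi j _) hj i _ | exact h

lemma pvRead_step {v : List (List Int)} {c : Int} {e : List (List (List Int))} {l : Nat}
    (h : pvShape e l) {i j : Nat} (hi : i < l) (hj : j < l) (p q : Nat) :
    pvRead (pvStepA v c e i j) p q =
      if (p = i ∧ q = j) ∨ (p = j ∧ q = i) then
        (if pvCondA (v.getD i []) (v.getD j []) c then pvValA (v.getD i []) (v.getD j [])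
         else pvRead e p q)
      else pvRead e p q := by
  simp only [pvStepA]
  by_cases hc : pvCondA (v.getD i []) (v.getD j []) c = true
  · obtain ⟨h1, h2⟩ := of_decide_eq_true hc
    rw [if_pos h1, if_pos h2, if_pos hc,
      pvRead_set2 (pvShape_set2 h hi j _) hj hi _ p q, pvRead_set2 h hi hj _ p q]
    by_cases ha : p = i ∧ q = j
    · rw [if_pos (Or.inl ha)]
      by_cases hb : p = j ∧ q = i
      · rw [if_pos hb]; rfl
      · rw [if_neg hb, if_pos ha]; rfl
    · by_cases hb : p = j ∧ q = i
      · rw [if_pos hb, if_pos (Or.inr hb)]; rfl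
      · rw [if_neg hb, if_neg ha, if_neg (by tauto)]
  · rw [if_neg hc]
    have hc' : ¬((|(v.getD i []).getD 0 0 - (v.getD j []).getD 0 0 +
          ((v.getD i []).getD 1 0 - (v.getD j []).getD 1 0)| ≤ c ∧
        (|(v.getD i []).getD 1 0 - (v.getD j []).getD 1 0| ≤
            |(v.getD i []).getD 0 0 - (v.getD j []).getD 0 0| ∨
          (v.getD i []).getD 0 0 - (v.getD j []).getD 0 0 = 0) ∧
        ((v.getD i []).getD 0 0 - (v.getD j []).getD 0 0 ≠ 0 ∨
          (v.getD i []).getD 1 0 - (v.getD j []).getD 1 0 ≠ 0)) ∧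
      (((v.getD i []).getD 0 0 - (v.getD j []).getD 0 0 ≤ 0 ∧
          (v.getD i []).getD 1 0 - (v.getD j []).getD 1 0 ≤ 0 ∧
          (v.getD i []).getD 2 0 = 0 ∧ (v.getD j []).getD 2 0 = 1) ∨
       (0 ≤ (v.getD i []).getD 0 0 - (v.getD j []).getD 0 0 ∧
          0 ≤ (v.getD i []).getD 1 0 - (v.getD j []).getD 1 0 ∧
          (v.getD i []).getD 2 0 = 1 ∧ (v.getD j []).getD 2 0 = 0))) :=
      fun hP => hc (decide_eq_true hP)
    by_cases h1 : (|(v.getD i []).getD 0 0 - (v.getD j []).getD 0 0 +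
        ((v.getD i []).getD 1 0 - (v.getD j []).getD 1 0)| ≤ c ∧
      (|(v.getD i []).getD 1 0 - (v.getD j []).getD 1 0| ≤
          |(v.getD i []).getD 0 0 - (v.getD j []).getD 0 0| ∨
        (v.getD i []).getD 0 0 - (v.getD j []).getD 0 0 = 0) ∧
      ((v.getD i []).getD 0 0 - (v.getD j []).getD 0 0 ≠ 0 ∨
        (v.getD i []).getD 1 0 - (v.getD j []).getD 1 0 ≠ 0))
    · rw [if_pos h1, if_neg (fun h2 => hc' ⟨h1, h2⟩)]
      split_ifs <;> rfl
    · rw [if_neg h1]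
      split_ifs <;> rfl

-- the flat list of index pairs A's two nested loops range over
def pvPairs (l : Nat) : List (Nat × Nat) :=
  (List.range l).flatMap (fun i => ((List.range l).drop (i + 1)).map (fun j => (i, j)))

lemma pvMem_pairs (l p q : Nat) : (p, q) ∈ pvPairs l ↔ p < q ∧ q < l := by
  simp only [pvPairs, List.mem_flatMap, List.mem_map, List.range_eq_range',
    List.drop_range', List.mem_range', Prod.mk.injEq]
  constructor
  · rintro ⟨i, ⟨t, ht, rfl⟩, j, ⟨⟨k, hk, rfl⟩, rfl, rfl⟩⟩
    omega
  · rintro ⟨hpq, hql⟩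
    exact ⟨p, ⟨p, by omega, by omega⟩, q, ⟨⟨q - (p + 1), by omega, by omega⟩, rfl, by omega⟩⟩

lemma pvNodup_pairs (l : Nat) : (pvPairs l).Nodup := by
  unfold pvPairs
  refine List.nodup_flatMap.mpr ⟨?_, ?_⟩
  · intro i _
    exact List.Nodup.map (fun a b h' => by simpa using h')
      (List.Nodup.sublist (List.drop_sublist _ _) List.nodup_range)
  · refine List.Pairwise.imp ?_ List.nodup_range
    intro a b hab x hx hx'
    simp only [List.mem_map] at hx hx'
    obtain ⟨j1, _, rfl⟩ := hx
    obtain ⟨j2, _, h'⟩ := hx'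
    exact hab (by simpa using congrArg Prod.fst h'.symm)

lemma pvFold_shape (v : List (List Int)) (c : Int) (l : Nat) (ps : List (Nat × Nat))
    (e : List (List (List Int))) (h : pvShape e l)
    (hps : ∀ x ∈ ps, x.1 < x.2 ∧ x.2 < l) :
    pvShape (ps.foldl (fun e ij => pvStepA v c e ij.1 ij.2) e) l := by
  induction ps generalizing e with
  | nil => exact h
  | cons hd tl ih =>
    obtain ⟨hij, hjl⟩ := hps hd (List.mem_cons_self)
    exact ih _ (pvShape_step h (by omega) hjl) (fun x hx => hps x (List.mem_cons_of_mem _ hx))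

-- main fold invariant for A: each unordered pair is written at most once, mirrored
lemma pvFold_read (v : List (List Int)) (c : Int) (l : Nat)
    (ps : List (Nat × Nat)) (e : List (List (List Int))) (h : pvShape e l)
    (hps : ∀ x ∈ ps, x.1 < x.2 ∧ x.2 < l) (hnd : ps.Nodup)
    (p q : Nat) :
    pvRead (ps.foldl (fun e ij => pvStepA v c e ij.1 ij.2) e) p q =
      if (p, q) ∈ ps ∨ (q, p) ∈ ps then
        (if pvCondA (v.getD p []) (v.getD q []) c then pvValA (v.getD p []) (v.getD q [])
         else pvRead e p q)
      else pvRead e p q := by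
  induction ps generalizing e with
  | nil => simp
  | cons hd tl ih =>
    obtain ⟨i, j⟩ := hd
    obtain ⟨hij, hjl⟩ := hps (i, j) (List.mem_cons_self)
    have hil : i < l := by omega
    simp only [List.foldl_cons]
    rw [ih _ (pvShape_step h hil hjl) (fun x hx => hps x (List.mem_cons_of_mem _ hx))
      hnd.of_cons]
    by_cases h1 : p = i ∧ q = j
    · obtain ⟨hp, hq⟩ := h1
      subst hp; subst hq
      have hnin : (p, q) ∉ tl := (List.nodup_cons.mp hnd).1
      have hnin2 : (q, p) ∉ tl := fun hm => by have := (hps _ (List.mem_cons_of_mem _ hm)).1; omega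
      rw [if_neg (by tauto), pvRead_step h hil hjl, if_pos (Or.inl ⟨rfl, rfl⟩),
        if_pos (Or.inl List.mem_cons_self)]
    · by_cases h2 : p = j ∧ q = i
      · obtain ⟨hp, hq⟩ := h2
        subst hp; subst hq
        have hnin : (q, p) ∉ tl := (List.nodup_cons.mp hnd).1
        have hnin2 : (p, q) ∉ tl := fun hm => by have := (hps _ (List.mem_cons_of_mem _ hm)).1; omega
        rw [if_neg (by tauto), pvRead_step h hil hjl, if_pos (Or.inr ⟨rfl, rfl⟩),
          if_pos (Or.inr List.mem_cons_self)]
        exact if_congr (by rw [pvCondA_symm]) (pvValA_symm _ _) rfl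
      · have hX : pvRead (pvStepA v c e i j) p q = pvRead e p q := by
          rw [pvRead_step h hil hjl, if_neg (by tauto)]
        rw [hX]
        refine if_congr ?_ rfl rfl
        simp only [List.mem_cons, Prod.mk.injEq]
        tauto

lemma pvRead_e0 (l p q : Nat) :
    pvRead ((List.range l).map (fun _ => (List.range l).map (fun _ => ([0, 0, 0] : List Int))))
      p q = [0, 0, 0] := by
  have hr : ∀ m : Nat, (List.range l)[m]? = if m < l then some m else none := by
    intro m
    split_ifs with h'
    · exact List.getElem?_range h'
    · exact List.getElem?_eq_none (by simpa using h')
  unfold pvRead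
  simp only [List.getD_eq_getElem?_getD, List.getElem?_map, hr]
  by_cases hp : p < l
  · rw [if_pos hp]
    simp only [Option.map_some, Option.getD_some, List.getElem?_map, hr]
    by_cases hq : q < l
    · rw [if_pos hq]; rfl
    · rw [if_neg hq]; rfl
  · rw [if_neg hp]; rfl

lemma pvShape_e0 (l : Nat) :
    pvShape ((List.range l).map (fun _ => (List.range l).map (fun _ => ([0, 0, 0] : List Int))))
      l := by
  refine ⟨by simp, ?_⟩
  intro r hr
  obtain ⟨_, _, rfl⟩ := List.mem_map.mp hr
  simp

lemma get_e_eq_fold (v : List (List Int)) (c : Int) :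
    get_e v c = (pvPairs v.length).foldl (fun e ij => pvStepA v c e ij.1 ij.2)
      ((List.range v.length).map
        (fun _ => (List.range v.length).map (fun _ => ([0, 0, 0] : List Int)))) := by
  simp only [get_e, pvPairs, List.foldl_flatMap, List.foldl_map]

-- ===== B-side lemmas =====

-- the index dict's lookup: the list of indices whose row has key k, in order
lemma pvIndex_getD (v : List (List Int)) (k : Int × Int × Int) :
    (pvIndex v).getD k [] =
      (((PySem.List.enumerate v 0).map (fun p => (pvKey p.2, p.1))).filter
        (fun p => p.1 == k)).map (·.2) := by
  have h := PySem.Dict.getD_foldl_modify_append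
    (l := (PySem.List.enumerate v 0).map (fun p => (pvKey p.2, p.1)))
    (d := (PySem.Dict.empty : PySem.Dict (Int × Int × Int) (List Int))) (c := k)
  rw [List.foldl_map] at h
  simpa [pvIndex, PySem.Dict.getD_empty] using h

lemma pvIndex_nodup_keys (v : List (List Int)) : (pvIndex v).keys.Nodup := by
  unfold pvIndex
  exact PySem.Dict.nodup_keys_foldl_modify_key _ (fun (p : Int × List Int) => pvKey p.2) _ _ _
    PySem.Dict.nodup_keys_empty

-- membership in a lookup list, in terms of positions of v
lemma pvMem_index_getD (v : List (List Int)) (k : Int × Int × Int) (j : Int) :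
    j ∈ (pvIndex v).getD k [] ↔
      ∃ q : Nat, q < v.length ∧ j = (q : Int) ∧ pvKey (v.getD q []) = k := by
  rw [pvIndex_getD]
  constructor
  · intro hmem
    obtain ⟨y, hy, rfl⟩ := List.mem_map.mp hmem
    obtain ⟨hy1, hy2⟩ := List.mem_filter.mp hy
    obtain ⟨p, hp, rfl⟩ := List.mem_map.mp hy1
    obtain ⟨q, hq, rfl⟩ := (PySem.List.mem_enumerate_iff _ _ _).mp hp
    have hvq : v.getD q [] = v[q] := by
      rw [List.getD_eq_getElem?_getD, List.getElem?_eq_getElem hq, Option.getD_some]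
    refine ⟨q, hq, by simp, ?_⟩
    rw [hvq]
    simpa using hy2
  · rintro ⟨q, hq, rfl, hk⟩
    have hvq : v.getD q [] = v[q] := by
      rw [List.getD_eq_getElem?_getD, List.getElem?_eq_getElem hq, Option.getD_some]
    refine List.mem_map.mpr ⟨(pvKey v[q], ((0 : Int) + (q : Nat))), ?_, by simp⟩
    refine List.mem_filter.mpr ⟨List.mem_map.mpr ⟨(((0 : Int) + (q : Nat)), v[q]), ?_, rfl⟩, ?_⟩
    · exact (PySem.List.mem_enumerate_iff _ _ _).mpr ⟨q, hq, rfl⟩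
    · rw [hvq] at hk
      simp [hk]

-- every item of the index dict is (k, lookup of k)
lemma pvIndex_items (v : List (List Int)) :
    (pvIndex v).items = (pvIndex v).keys.map (fun k => (k, (pvIndex v).getD k [])) := by
  exact PySem.Dict.items_eq_map_keys _ (pvIndex_nodup_keys v) []

-- setting a batch of positions, all holding the same value
lemma pvFoldl_set_getD (idxs : List Int) (r : List (List Int)) (x : List Int) (j0 : Nat)
    (hj0 : j0 < r.length) (hb : ∀ j ∈ idxs, 0 ≤ j ∧ j.toNat < r.length) :
    (idxs.foldl (fun r j => r.set j.toNat x) r).getD j0 [] =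
      if (j0 : Int) ∈ idxs then x else r.getD j0 [] := by
  induction idxs generalizing r with
  | nil => simp
  | cons hd tl ih =>
    obtain ⟨hhd0, hhdl⟩ := hb hd List.mem_cons_self
    rw [List.foldl_cons, ih (r.set hd.toNat x) (by simpa using hj0)
      (fun j hj => by simpa using hb j (List.mem_cons_of_mem _ hj))]
    rw [pvGetD_set r hd.toNat j0 x [] hhdl]
    by_cases h1 : (j0 : Int) ∈ tl
    · rw [if_pos h1, if_pos (List.mem_cons_of_mem _ h1)]
    · rw [if_neg h1]
      by_cases h2 : j0 = hd.toNat
      · rw [if_pos h2, if_pos (by simp only [List.mem_cons]; left; omega)]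
      · rw [if_neg h2, if_neg (by
          simp only [List.mem_cons]
          rintro (h3 | h3)
          · omega
          · exact h1 h3)]

lemma pvFoldl_set_length (idxs : List Int) (r : List (List Int)) (x : List Int) :
    (idxs.foldl (fun r j => r.set j.toNat x) r).length = r.length := by
  induction idxs generalizing r with
  | nil => rfl
  | cons hd tl ih => simp [ih]

lemma pvStepB_length (s : List Int) (c : Int) (row : List (List Int))
    (kv : (Int × Int × Int) × List Int) : (pvStepB s c row kv).length = row.length := by
  unfold pvStepB
  rcases pvLoad s kv.1 with _ | ⟨md, cd⟩
  · rfl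
  · dsimp only
    split_ifs
    · exact pvFoldl_set_length _ _ _
    · rfl

lemma pvRowB_fold_length (s : List Int) (c : Int) (L : List ((Int × Int × Int) × List Int))
    (r : List (List Int)) : (L.foldl (pvStepB s c) r).length = r.length := by
  induction L generalizing r with
  | nil => rfl
  | cons hd tl ih => rw [List.foldl_cons, ih, pvStepB_length]

-- reading one position of B's row fold
lemma pvRowB_fold_read (v : List (List Int)) (s : List Int) (c : Int)
    (L : List ((Int × Int × Int) × List Int)) (r : List (List Int)) (j0 : Nat)
    (hj0 : j0 < r.length) (hlen : r.length = v.length)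
    (hnd : (L.map (·.1)).Nodup)
    (hchar : ∀ kv ∈ L, ∀ j ∈ kv.2, 0 ≤ j ∧ j.toNat < v.length ∧ pvKey (v.getD j.toNat []) = kv.1)
    (hcompl : ∀ kv ∈ L, pvKey (v.getD j0 []) = kv.1 → (j0 : Int) ∈ kv.2) :
    (L.foldl (pvStepB s c) r).getD j0 [] =
      if pvKey (v.getD j0 []) ∈ L.map (·.1) then
        pvCellStepB s (pvKey (v.getD j0 [])) c (r.getD j0 [])
      else r.getD j0 [] := by
  induction L generalizing r with
  | nil => simp
  | cons kv tl ih =>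
    have hchar' : ∀ kv' ∈ tl, ∀ j ∈ kv'.2, 0 ≤ j ∧ j.toNat < v.length ∧
        pvKey (v.getD j.toNat []) = kv'.1 :=
      fun kv' h' => hchar kv' (List.mem_cons_of_mem _ h')
    have hcompl' : ∀ kv' ∈ tl, pvKey (v.getD j0 []) = kv'.1 → (j0 : Int) ∈ kv'.2 :=
      fun kv' h' => hcompl kv' (List.mem_cons_of_mem _ h')
    have hnd' : (tl.map (·.1)).Nodup := (List.nodup_cons.mp hnd).2
    have hlen' : (pvStepB s c r kv).length = v.length := by rw [pvStepB_length]; exact hlen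
    rw [List.foldl_cons, ih (pvStepB s c r kv) (by omega) hlen' hnd' hchar' hcompl']
    by_cases hk : pvKey (v.getD j0 []) = kv.1
    · have hknot : pvKey (v.getD j0 []) ∉ tl.map (·.1) := by
        rw [hk]; exact (List.nodup_cons.mp hnd).1
      rw [if_neg hknot, if_pos (by simp [← hk])]
      unfold pvStepB pvCellStepB
      rw [hk]
      rcases hL : pvLoad s kv.1 with _ | ⟨md, cd⟩
      · rfl
      · dsimp only
        split_ifs with hcond
        · rw [pvFoldl_set_getD kv.2 r [1, md, cd] j0 hj0 (fun j hj => by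
            obtain ⟨hj1, hj2, -⟩ := hchar kv List.mem_cons_self j hj
            exact ⟨hj1, by omega⟩)]
          rw [if_pos (hcompl kv List.mem_cons_self hk)]
        · rfl
    · have hstep : (pvStepB s c r kv).getD j0 [] = r.getD j0 [] := by
        unfold pvStepB
        rcases hL : pvLoad s kv.1 with _ | ⟨md, cd⟩
        · rfl
        · dsimp only
          split_ifs with hcond
          · rw [pvFoldl_set_getD kv.2 r [1, md, cd] j0 hj0 (fun j hj => by
              obtain ⟨hj1, hj2, -⟩ := hchar kv List.mem_cons_self j hj
              exact ⟨hj1, by omega⟩)]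
            rw [if_neg (by
              intro hj0mem
              obtain ⟨-, -, hkey⟩ := hchar kv List.mem_cons_self _ hj0mem
              rw [Int.toNat_natCast] at hkey
              exact hk hkey)]
          · rfl
      rw [hstep]
      refine if_congr ?_ rfl rfl
      simp only [List.map_cons, List.mem_cons]
      constructor
      · intro h; exact Or.inr h
      · rintro (h | h)
        · exact absurd h hk
        · exact h

-- ===== VERDICT (by name: the statement is the Claim_ definition above) =====
theorem get_e_spec : Claim_equal_get_e := by
  unfold Claim_equal_get_e Spec_get_e
  intro v c _ _
  rw [get_e_eq_fold]
  have hps : ∀ x ∈ pvPairs v.length, x.1 < x.2 ∧ x.2 < v.length := by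
    rintro ⟨a, b⟩ hx
    exact (pvMem_pairs v.length a b).mp hx
  have hsh := pvFold_shape v c v.length (pvPairs v.length) _ (pvShape_e0 v.length) hps
  have haltlen : (get_e_alt v c).length = v.length := by simp [get_e_alt]
  apply List.ext_getElem
  · rw [hsh.1, haltlen]
  intro p hp1 hp2
  have hpl : p < v.length := by rw [hsh.1] at hp1; exact hp1
  have hrowalt : (get_e_alt v c)[p]'hp2 = pvRowB (pvIndex v) (v[p]'hpl) c v.length := by
    simp [get_e_alt]
  have hrowaltlen : (pvRowB (pvIndex v) (v[p]'hpl) c v.length).length = v.length := by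
    unfold pvRowB
    rw [pvRowB_fold_length, List.length_replicate]
  apply List.ext_getElem
  · rw [hsh.2 _ (List.getElem_mem hp1), hrowalt, hrowaltlen]
  intro q hq1 hq2
  have hql : q < v.length := by
    rw [hsh.2 _ (List.getElem_mem hp1)] at hq1; exact hq1
  -- the A side cell
  rw [pvGetElem_eq_read _ p q hp1 hq1,
    pvFold_read v c v.length _ _ (pvShape_e0 v.length) hps (pvNodup_pairs v.length),
    pvRead_e0]
  -- the B side cell
  have hq2' : q < (pvRowB (pvIndex v) (v[p]'hpl) c v.length).length := by
    rw [hrowaltlen]; exact hql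
  have hbcell : ((get_e_alt v c)[p]'hp2)[q]'hq2 =
      (pvRowB (pvIndex v) (v[p]'hpl) c v.length).getD q [] := by
    simp only [hrowalt]
    rw [List.getD_eq_getElem?_getD, List.getElem?_eq_getElem hq2', Option.getD_some]
  rw [hbcell]
  have hkeysnd : ((pvIndex v).items.map (·.1)).Nodup := pvIndex_nodup_keys v
  have hchar : ∀ kv ∈ (pvIndex v).items, ∀ j ∈ kv.2, 0 ≤ j ∧ j.toNat < v.length ∧
      pvKey (v.getD j.toNat []) = kv.1 := by
    intro kv hkv j hj
    rw [pvIndex_items] at hkv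
    obtain ⟨k, hk, rfl⟩ := List.mem_map.mp hkv
    obtain ⟨q', hq', rfl, hkey⟩ := (pvMem_index_getD v k j).mp hj
    exact ⟨by omega, by rw [Int.toNat_natCast]; exact hq', by rw [Int.toNat_natCast]; exact hkey⟩
  have hcompl2 : ∀ kv ∈ (pvIndex v).items, pvKey (v.getD q []) = kv.1 → (q : Int) ∈ kv.2 := by
    intro kv hkv hkey
    rw [pvIndex_items] at hkv
    obtain ⟨k, hk, rfl⟩ := List.mem_map.mp hkv
    exact (pvMem_index_getD v k q).mpr ⟨q, hql, rfl, by simpa using hkey⟩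
  have hmemkeys : pvKey (v.getD q []) ∈ (pvIndex v).items.map (·.1) := by
    have hqmem : ((q : Nat) : Int) ∈ (pvIndex v).getD (pvKey (v.getD q [])) [] :=
      (pvMem_index_getD v _ q).mpr ⟨q, hql, rfl, rfl⟩
    by_contra hnot
    rw [PySem.Dict.getD_of_not_contains _ _ (by
      rw [PySem.Dict.contains_eq_decide_mem_keys]
      simpa [PySem.Dict.keys] using hnot)] at hqmem
    simp at hqmem
  have hrepl : (List.replicate v.length ([0, 0, 0] : List Int)).getD q [] = [0, 0, 0] := by
    rw [List.getD_eq_getElem?_getD, List.getElem?_replicate, if_pos hql, Option.getD_some]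
  unfold pvRowB
  rw [pvRowB_fold_read v (v[p]'hpl) c ((pvIndex v).items) _ q
    (by rw [List.length_replicate]; exact hql) (List.length_replicate ..) hkeysnd hchar hcompl2,
    if_pos hmemkeys, hrepl]
  have hv1 : v.getD p [] = v[p]'hpl := by
    rw [List.getD_eq_getElem?_getD, List.getElem?_eq_getElem hpl, Option.getD_some]
  have hv2 : v.getD q [] = v[q]'hql := by
    rw [List.getD_eq_getElem?_getD, List.getElem?_eq_getElem hql, Option.getD_some]
  rw [hv2, pvCellStepB_eq_cellA (v[p]'hpl) (v[q]'hql) c, hv1]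
  by_cases hpq : p = q
  · subst hpq
    rw [if_neg (by
      rintro (h | h) <;> exact absurd ((pvMem_pairs v.length _ _).mp h) (by omega))]
    have hdiag := pvCondA_diag (v[p]'hpl) c
    unfold pvCellA
    rw [hdiag]
    rfl
  · rw [if_pos (by
      rcases Nat.lt_or_ge p q with h | h
      · exact Or.inl ((pvMem_pairs v.length p q).mpr ⟨h, hql⟩)
      · exact Or.inr ((pvMem_pairs v.length q p).mpr ⟨by omega, hpl⟩))]
    rfl
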